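-- pv_equiv track=rewrite | github.com/LanLab/STECFinder | stecfinder/stecfinder.py | top_ranked_stx_bac
-- ===== SOURCE A (Python) =====
-- def delete_genes(remove, genes):
--     for g in remove:
--         del genes[g]
--     return genes
--
-- def top_ranked_stx_bac(genes_set):
--     genetypes = ["stx1", "stx2"]
--     tophits = {x: ["", 0] for x in genetypes}
--     for gene in genes_set:
--         if gene.startswith("stx"):
--             genetype = gene[:4]
--             genescore = genes_set[gene]['score']
--             if genescore > tophits[genetype][1]:
--                 tophits[genetype] = [gene, genescore]
--     remove = []
--     for gene in genes_set:
--         if gene.startswith("stx"):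
--             genetype = gene[:4]
--             if gene != tophits[genetype][0]:
--                 remove.append(gene)
--     genes = delete_genes(remove, genes_set)
--     return genes
-- ===== SOURCE B (Python) =====
-- def top_ranked_stx_bac(genes_set):
--     # Group the stx gene hits by their 4-char type, then keep only the first
--     # gene reaching the (strictly positive) maximum score of each group.
--     groups = {"stx1": [], "stx2": []}
--     for gene, info in genes_set.items():
--         if gene.startswith("stx"):
--             groups[gene[:4]].append((gene, info["score"]))
--     keep = set()
--     for grp in groups.values():
--         if grp:
--             gene, score = max(grp, key=lambda p: p[1])
--             if score > 0:
--                 keep.add(gene)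
--     for gene in [g for g in genes_set if g.startswith("stx") and g not in keep]:
--         del genes_set[gene]
--     return genes_set
-- ===== Notes on version B (the rewrite author's own statement) =====
-- stated objective: simpler
-- what changed: Instead of threading a best-so-far dict through a strict-compare loop and a second mismatch scan, B groups the stx hits by their 4-char type in one pass, picks each group's first maximum with max(key=...) keeping it only if strictly positive, and deletes every stx gene outside that keep set.
import Mathlib
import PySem

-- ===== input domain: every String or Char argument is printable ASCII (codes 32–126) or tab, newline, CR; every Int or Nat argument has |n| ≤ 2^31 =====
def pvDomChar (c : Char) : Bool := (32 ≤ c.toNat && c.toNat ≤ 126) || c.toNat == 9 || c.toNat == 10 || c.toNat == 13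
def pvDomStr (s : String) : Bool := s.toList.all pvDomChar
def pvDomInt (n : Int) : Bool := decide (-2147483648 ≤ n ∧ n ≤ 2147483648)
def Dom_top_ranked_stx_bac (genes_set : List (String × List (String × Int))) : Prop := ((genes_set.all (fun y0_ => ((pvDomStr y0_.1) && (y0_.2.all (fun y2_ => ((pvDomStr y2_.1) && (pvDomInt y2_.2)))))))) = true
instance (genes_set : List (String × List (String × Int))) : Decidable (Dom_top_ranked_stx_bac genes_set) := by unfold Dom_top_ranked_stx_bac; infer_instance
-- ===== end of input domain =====

-- B groups the stx hits by type and keeps each group's first strictly-positive maximum (max with key),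
-- instead of A's best-so-far dict threaded through a strict-compare loop; same O(n) cost, plainer shape.
-- Both Pythons delete the dropped genes from genes_set IN PLACE and return it; the theorems below are
-- about the returned value (both ports perform the same deletions, so the mutated dict agrees too).


-- ===== PORT A =====
-- loop body of A's first pass: update tophits[gene[:4]] when the score strictly beats the stored one
-- (the 'none' arms are where Python raises KeyError — excluded by Pre_)
def trsA_tophit_step (gd : PySem.Dict String (List (String × Int)))
    (th : PySem.Dict String (String × Int)) (p : String × List (String × Int)) :
    PySem.Dict String (String × Int) :=
  if PySem.Str.startswith p.1 "stx" then
    match PySem.Dict.get? (PySem.Dict.mk (PySem.Dict.getD gd p.1 [])) "score" with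
    | none => th
    | some genescore =>
      match PySem.Dict.get? th (PySem.Str.slice p.1 none (some 4)) with
      | none => th
      | some top =>
        if genescore > top.2 then
          PySem.Dict.insert th (PySem.Str.slice p.1 none (some 4)) (p.1, genescore)
        else th
  else th

-- loop body of A's second pass: append gene to remove when it is not the top hit of its type
def trsA_remove_step (tophits : PySem.Dict String (String × Int))
    (r : List String) (p : String × List (String × Int)) : List String :=
  if PySem.Str.startswith p.1 "stx" then
    match PySem.Dict.get? tophits (PySem.Str.slice p.1 none (some 4)) with
    | none => r
    | some top => if p.1 ≠ top.1 then r ++ [p.1] else r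
  else r

-- Python's del raises KeyError on a missing key; here every removed key is present (Pre_: no duplicates),
-- where erase is exact
def delete_genes (remove : List String) (genes : PySem.Dict String (List (String × Int))) :
    PySem.Dict String (List (String × Int)) :=
  remove.foldl (fun d g => PySem.Dict.erase d g) genes

def top_ranked_stx_bac (genes_set : List (String × List (String × Int))) : List (String × List (String × Int)) :=
  let gd : PySem.Dict String (List (String × Int)) := PySem.Dict.mk genes_set
  let tophits := genes_set.foldl (trsA_tophit_step gd)
    (PySem.Dict.mk [("stx1", ("", 0)), ("stx2", ("", 0))])
  let remove := genes_set.foldl (trsA_remove_step tophits) []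
  (delete_genes remove gd).items

-- ===== PORT B =====
-- loop body of B's grouping pass: groups[gene[:4]].append((gene, info["score"]))
-- (the 'none' arms are where Python raises KeyError — excluded by Pre_)
def altGroup_step (d : PySem.Dict String (List (String × Int))) (p : String × List (String × Int)) :
    PySem.Dict String (List (String × Int)) :=
  if PySem.Str.startswith p.1 "stx" then
    match PySem.Dict.get? (PySem.Dict.mk p.2) "score" with
    | none => d
    | some s =>
      match PySem.Dict.get? d (PySem.Str.slice p.1 none (some 4)) with
      | none => d
      | some grp => PySem.Dict.insert d (PySem.Str.slice p.1 none (some 4)) (grp ++ [(p.1, s)])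
  else d

-- loop body of B's keep pass: keep the first maximum of a non-empty group when strictly positive
def altKeep_step (k : PySem.Set String) (grp : List (String × Int)) : PySem.Set String :=
  if grp.isEmpty then k
  else
    match PySem.List.max? grp (fun q => q.2) with
    | none => k
    | some m => if m.2 > 0 then PySem.Set.add k m.1 else k

def top_ranked_stx_bac_alt (genes_set : List (String × List (String × Int))) : List (String × List (String × Int)) :=
  let groups := genes_set.foldl altGroup_step (PySem.Dict.mk [("stx1", []), ("stx2", [])])
  let keep := (PySem.Dict.values groups).foldl altKeep_step PySem.Set.empty
  let removeL := (genes_set.map (fun p => p.1)).filter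
    (fun g => PySem.Str.startswith g "stx" && !(keep.contains g))
  (removeL.foldl (fun d g => PySem.Dict.erase d g) (PySem.Dict.mk genes_set)).items

-- ===== PRECONDITION & SPEC =====
-- Pre_ excludes (a) association lists with duplicate keys, which do not represent a Python dict
-- (the Python function receives a dict, where such keys have already collapsed), and (b) inputs
-- where A raises KeyError: a key starting with "stx" whose first four characters are neither
-- "stx1" nor "stx2", or an stx key whose value dict lacks the key "score".
def Pre_top_ranked_stx_bac (genes_set : List (String × List (String × Int))) : Prop :=
  (genes_set.map (fun p => p.1)).Nodup ∧
  ∀ p ∈ genes_set, PySem.Str.startswith p.1 "stx" = true →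
    (PySem.Str.slice p.1 none (some 4) = "stx1" ∨ PySem.Str.slice p.1 none (some 4) = "stx2") ∧
    PySem.Dict.contains (PySem.Dict.mk p.2) "score" = true

instance (genes_set : List (String × List (String × Int))) : Decidable (Pre_top_ranked_stx_bac genes_set) := by
  unfold Pre_top_ranked_stx_bac; infer_instance

def pvWitness_top_ranked_stx_bac : (List (String × List (String × Int))) :=
  [("stx1a", [("score", 3)]), ("stx1b", [("score", 3)]), ("stx2c", [("score", -1)]), ("eae", [("score", 9)])]

def Spec_top_ranked_stx_bac (genes_set : List (String × List (String × Int))) (out : List (String × List (String × Int))) : Prop := out = top_ranked_stx_bac_alt genes_set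
instance (genes_set : List (String × List (String × Int))) (out : List (String × List (String × Int))) : Decidable (Spec_top_ranked_stx_bac genes_set out) := by unfold Spec_top_ranked_stx_bac; infer_instance

-- ===== CLAIM (what is proved, stated in full; the proofs are below) =====
def Claim_equal_top_ranked_stx_bac : Prop := ∀ (genes_set : List (String × List (String × Int))), Dom_top_ranked_stx_bac genes_set → Pre_top_ranked_stx_bac genes_set → Spec_top_ranked_stx_bac genes_set (top_ranked_stx_bac genes_set)

-- ===== LEMMAS AND PROOFS =====

-- the common per-type projection: the (gene, score) pairs of the stx genes of type t, in order
def pvProj (t : String) (l : List (String × List (String × Int))) : List (String × Int) :=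
  l.filterMap (fun p =>
    if PySem.Str.startswith p.1 "stx" && (PySem.Str.slice p.1 none (some 4) == t)
    then some (p.1, PySem.Dict.getD (PySem.Dict.mk p.2) "score" 0) else none)

-- "keep the incumbent unless strictly beaten" — the step A's loop and Python's max(key=...) both take
def pvStep (c y : String × Int) : String × Int := if c.2 < y.2 then y else c

-- the gene B keeps for one group: the first maximum, if strictly positive
def pvKOpt (G : List (String × Int)) : Option String :=
  match G with
  | [] => none
  | x :: tl => if (tl.foldl pvStep x).2 > 0 then some (tl.foldl pvStep x).1 else none

lemma pvStep_assoc (a b c : String × Int) : pvStep (pvStep a b) c = pvStep a (pvStep b c) := by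
  unfold pvStep; split_ifs <;> first | rfl | omega

lemma pvFoldl_step_out (l : List (String × Int)) (a b : String × Int) :
    l.foldl pvStep (pvStep a b) = pvStep a (l.foldl pvStep b) := by
  induction l generalizing b with
  | nil => rfl
  | cons y tl ih => rw [List.foldl_cons, List.foldl_cons, pvStep_assoc, ih]

lemma pvFoldl_step_mem (tl : List (String × Int)) (x : String × Int) :
    tl.foldl pvStep x ∈ x :: tl := by
  induction tl generalizing x with
  | nil => simp
  | cons y tl ih =>
    rw [List.foldl_cons]
    by_cases h : x.2 < y.2 <;> simp only [pvStep, h, if_true, if_false] <;>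
      [rcases List.mem_cons.1 (ih y) with h2 | h2; rcases List.mem_cons.1 (ih x) with h2 | h2] <;>
      simp [h2]

lemma pvMax?_cons (x : String × Int) (tl : List (String × Int)) :
    PySem.List.max? (x :: tl) (fun q => q.2) = some (tl.foldl pvStep x) := by
  simp only [PySem.List.max?, List.foldl_cons]
  induction tl generalizing x with
  | nil => rfl
  | cons y tl ih =>
    rw [List.foldl_cons, List.foldl_cons]
    show List.foldl _ (if x.2 < y.2 then some y else some x) tl = _
    split_ifs with h <;> rw [ih] <;> simp [pvStep, h]

lemma pvProj_mem {t : String} {l : List (String × List (String × Int))} {q : String × Int}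
    (h : q ∈ pvProj t l) :
    PySem.Str.startswith q.1 "stx" = true ∧ PySem.Str.slice q.1 none (some 4) = t := by
  simp only [pvProj, List.mem_filterMap] at h
  obtain ⟨p, _, hp⟩ := h
  by_cases hc : PySem.Str.startswith p.1 "stx" && (PySem.Str.slice p.1 none (some 4) == t)
  · rw [if_pos hc] at hp
    rw [Bool.and_eq_true] at hc
    obtain ⟨h1, h2⟩ := hc
    cases hp
    exact ⟨h1, by simpa using h2⟩
  · rw [if_neg hc] at hp; cases hp

-- A's first pass, characterised: the tophits dict is the per-type strict-max fold of the projections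
lemma pvTophits_fold (orig : List (String × List (String × Int)))
    (hnd : (orig.map (fun p => p.1)).Nodup) :
    ∀ (l : List (String × List (String × Int))) (b1 b2 : String × Int),
      (∀ p ∈ l, p ∈ orig) →
      (∀ p ∈ l, PySem.Str.startswith p.1 "stx" = true →
        (PySem.Str.slice p.1 none (some 4) = "stx1" ∨ PySem.Str.slice p.1 none (some 4) = "stx2") ∧
        PySem.Dict.contains (PySem.Dict.mk p.2) "score" = true) →
      l.foldl (trsA_tophit_step (PySem.Dict.mk orig)) (PySem.Dict.mk [("stx1", b1), ("stx2", b2)]) =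
        PySem.Dict.mk [("stx1", (pvProj "stx1" l).foldl pvStep b1),
                       ("stx2", (pvProj "stx2" l).foldl pvStep b2)] := by
  intro l
  induction l with
  | nil => intro b1 b2 _ _; rfl
  | cons p l ih =>
    intro b1 b2 hmem hpre
    have hmem' : ∀ q ∈ l, q ∈ orig := fun q hq => hmem q (List.mem_cons_of_mem _ hq)
    have hpre' : ∀ q ∈ l, _ := fun q hq => hpre q (List.mem_cons_of_mem _ hq)
    rw [List.foldl_cons]
    by_cases hsw : PySem.Str.startswith p.1 "stx"
    · obtain ⟨htype, hsc⟩ := hpre p (List.mem_cons_self) hsw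
      have hswc : PySem.Chars.startswith p.1.toList ['s','t','x'] = true := by simpa using hsw
      -- the global lookup returns p's own value dict
      have hgd : PySem.Dict.getD (PySem.Dict.mk orig) p.1 [] = p.2 := by
        have : (p.1, p.2) ∈ (PySem.Dict.mk orig).items := by
          simpa using hmem p List.mem_cons_self
        exact PySem.Dict.getD_of_mem_items _ this (by simpa using hnd) []
      -- score is present
      obtain ⟨s, hs⟩ : ∃ s, PySem.Dict.get? (PySem.Dict.mk p.2) "score" = some s := by
        have := PySem.Dict.contains_eq_isSome_get? (d := PySem.Dict.mk p.2) (k := "score")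
        rw [hsc] at this
        exact Option.isSome_iff_exists.1 this.symm
      have hsD : PySem.Dict.getD (PySem.Dict.mk p.2) "score" 0 = s :=
        PySem.Dict.getD_of_get?_eq_some _ 0 hs
      rcases htype with ht | ht
      · -- type "stx1"
        have hstep : trsA_tophit_step (PySem.Dict.mk orig) (PySem.Dict.mk [("stx1", b1), ("stx2", b2)]) p
            = PySem.Dict.mk [("stx1", pvStep b1 (p.1, s)), ("stx2", b2)] := by
          simp only [trsA_tophit_step, hsw, if_true, hgd, hs, ht]
          have hget : PySem.Dict.get? (PySem.Dict.mk [("stx1", b1), ("stx2", b2)]) "stx1" = some b1 := by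
            simp [PySem.Dict.get?_mk_cons]
          rw [hget]
          simp only [gt_iff_lt, pvStep]
          split_ifs with h
          · simp [PySem.Dict.insert, PySem.Dict.contains]
          · rfl
        rw [hstep, ih _ _ hmem' hpre']
        have hproj1 : pvProj "stx1" (p :: l) = (p.1, s) :: pvProj "stx1" l := by
          simp [pvProj, hswc, ht, hsD]
        have hproj2 : pvProj "stx2" (p :: l) = pvProj "stx2" l := by
          simp [pvProj, hswc, ht]
        rw [hproj1, hproj2, List.foldl_cons]
      · -- type "stx2"
        have hstep : trsA_tophit_step (PySem.Dict.mk orig) (PySem.Dict.mk [("stx1", b1), ("stx2", b2)]) p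
            = PySem.Dict.mk [("stx1", b1), ("stx2", pvStep b2 (p.1, s))] := by
          simp only [trsA_tophit_step, hsw, if_true, hgd, hs, ht]
          have hget : PySem.Dict.get? (PySem.Dict.mk [("stx1", b1), ("stx2", b2)]) "stx2" = some b2 := by
            simp [PySem.Dict.get?_mk_cons]
          rw [hget]
          simp only [gt_iff_lt, pvStep]
          split_ifs with h
          · simp [PySem.Dict.insert, PySem.Dict.contains]
          · rfl
        rw [hstep, ih _ _ hmem' hpre']
        have hproj1 : pvProj "stx1" (p :: l) = pvProj "stx1" l := by
          simp [pvProj, hswc, ht]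
        have hproj2 : pvProj "stx2" (p :: l) = (p.1, s) :: pvProj "stx2" l := by
          simp [pvProj, hswc, ht, hsD]
        rw [hproj1, hproj2, List.foldl_cons]
    · have hsw' : PySem.Str.startswith p.1 "stx" = false := by simpa using hsw
      have hswc : PySem.Chars.startswith p.1.toList ['s','t','x'] = false := by simpa using hsw
      have hstep : trsA_tophit_step (PySem.Dict.mk orig) (PySem.Dict.mk [("stx1", b1), ("stx2", b2)]) p
          = PySem.Dict.mk [("stx1", b1), ("stx2", b2)] := by
        simp only [trsA_tophit_step]; rw [hsw']; simp
      have hproj1 : pvProj "stx1" (p :: l) = pvProj "stx1" l := by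
        simp [pvProj, hswc]
      have hproj2 : pvProj "stx2" (p :: l) = pvProj "stx2" l := by
        simp [pvProj, hswc]
      rw [hstep, ih _ _ hmem' hpre', hproj1, hproj2]

-- B's grouping pass, characterised: groups is the dict of the per-type projections
lemma pvGroups_fold :
    ∀ (l : List (String × List (String × Int))) (a1 a2 : List (String × Int)),
      (∀ p ∈ l, PySem.Str.startswith p.1 "stx" = true →
        (PySem.Str.slice p.1 none (some 4) = "stx1" ∨ PySem.Str.slice p.1 none (some 4) = "stx2") ∧
        PySem.Dict.contains (PySem.Dict.mk p.2) "score" = true) →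
      l.foldl altGroup_step (PySem.Dict.mk [("stx1", a1), ("stx2", a2)]) =
        PySem.Dict.mk [("stx1", a1 ++ pvProj "stx1" l), ("stx2", a2 ++ pvProj "stx2" l)] := by
  intro l
  induction l with
  | nil => intro a1 a2 _; simp [pvProj]
  | cons p l ih =>
    intro a1 a2 hpre
    have hpre' : ∀ q ∈ l, _ := fun q hq => hpre q (List.mem_cons_of_mem _ hq)
    rw [List.foldl_cons]
    by_cases hsw : PySem.Str.startswith p.1 "stx"
    · obtain ⟨htype, hsc⟩ := hpre p (List.mem_cons_self) hsw
      have hswc : PySem.Chars.startswith p.1.toList ['s','t','x'] = true := by simpa using hsw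
      obtain ⟨s, hs⟩ : ∃ s, PySem.Dict.get? (PySem.Dict.mk p.2) "score" = some s := by
        have := PySem.Dict.contains_eq_isSome_get? (d := PySem.Dict.mk p.2) (k := "score")
        rw [hsc] at this
        exact Option.isSome_iff_exists.1 this.symm
      have hsD : PySem.Dict.getD (PySem.Dict.mk p.2) "score" 0 = s :=
        PySem.Dict.getD_of_get?_eq_some _ 0 hs
      rcases htype with ht | ht
      · have hstep : altGroup_step (PySem.Dict.mk [("stx1", a1), ("stx2", a2)]) p
            = PySem.Dict.mk [("stx1", a1 ++ [(p.1, s)]), ("stx2", a2)] := by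
          simp only [altGroup_step, hsw, if_true, hs, ht]
          have hget : PySem.Dict.get? (PySem.Dict.mk [("stx1", a1), ("stx2", a2)]) "stx1" = some a1 := by
            simp [PySem.Dict.get?_mk_cons]
          rw [hget]
          simp [PySem.Dict.insert, PySem.Dict.contains]
        rw [hstep, ih _ _ hpre']
        have hproj1 : pvProj "stx1" (p :: l) = (p.1, s) :: pvProj "stx1" l := by
          simp [pvProj, hswc, ht, hsD]
        have hproj2 : pvProj "stx2" (p :: l) = pvProj "stx2" l := by
          simp [pvProj, hswc, ht]
        rw [hproj1, hproj2]; simp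
      · have hstep : altGroup_step (PySem.Dict.mk [("stx1", a1), ("stx2", a2)]) p
            = PySem.Dict.mk [("stx1", a1), ("stx2", a2 ++ [(p.1, s)])] := by
          simp only [altGroup_step, hsw, if_true, hs, ht]
          have hget : PySem.Dict.get? (PySem.Dict.mk [("stx1", a1), ("stx2", a2)]) "stx2" = some a2 := by
            simp [PySem.Dict.get?_mk_cons]
          rw [hget]
          simp [PySem.Dict.insert, PySem.Dict.contains]
        rw [hstep, ih _ _ hpre']
        have hproj1 : pvProj "stx1" (p :: l) = pvProj "stx1" l := by
          simp [pvProj, hswc, ht]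
        have hproj2 : pvProj "stx2" (p :: l) = (p.1, s) :: pvProj "stx2" l := by
          simp [pvProj, hswc, ht, hsD]
        rw [hproj1, hproj2]; simp
    · have hsw' : PySem.Str.startswith p.1 "stx" = false := by simpa using hsw
      have hswc : PySem.Chars.startswith p.1.toList ['s','t','x'] = false := by simpa using hsw
      have hstep : altGroup_step (PySem.Dict.mk [("stx1", a1), ("stx2", a2)]) p
          = PySem.Dict.mk [("stx1", a1), ("stx2", a2)] := by
        simp only [altGroup_step]; rw [hsw']; simp
      have hproj1 : pvProj "stx1" (p :: l) = pvProj "stx1" l := by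
        simp [pvProj, hswc]
      have hproj2 : pvProj "stx2" (p :: l) = pvProj "stx2" l := by
        simp [pvProj, hswc]
      rw [hstep, ih _ _ hpre', hproj1, hproj2]

-- one step of A's remove loop only appends
lemma pvRemove_step_out (th : PySem.Dict String (String × Int))
    (r : List String) (p : String × List (String × Int)) :
    trsA_remove_step th r p = r ++ trsA_remove_step th [] p := by
  unfold trsA_remove_step
  by_cases hsw : PySem.Str.startswith p.1 "stx" <;> simp only [hsw, if_true]
  · cases PySem.Dict.get? th (PySem.Str.slice p.1 none (some 4)) with
    | none => simp
    | some top => by_cases h : p.1 ≠ top.1 <;> simp [h]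
  · simp

-- A's remove list as a flatMap
lemma pvRemoveA_fold (th : PySem.Dict String (String × Int)) :
    ∀ (l : List (String × List (String × Int))) (r : List String),
      l.foldl (trsA_remove_step th) r = r ++ l.flatMap (fun p => trsA_remove_step th [] p) := by
  intro l
  induction l with
  | nil => intro r; simp
  | cons p l ih =>
    intro r
    rw [List.foldl_cons, ih, pvRemove_step_out, List.flatMap_cons, List.append_assoc]

-- B's remove list as a flatMap
lemma pvRemoveB_eq_flatMap (q : String → Bool) (l : List (String × List (String × Int))) :
    (l.map (fun p => p.1)).filter q = l.flatMap (fun p => if q p.1 then [p.1] else []) := by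
  induction l with
  | nil => rfl
  | cons p l ih =>
    rw [List.map_cons, List.filter_cons, List.flatMap_cons, ← ih]
    by_cases h : q p.1 <;> simp [h]

lemma pvAltKeep_step_eq (k : PySem.Set String) (G : List (String × Int)) :
    altKeep_step k G = match pvKOpt G with | none => k | some g => PySem.Set.add k g := by
  cases G with
  | nil => rfl
  | cons x tl =>
    simp only [altKeep_step, List.isEmpty_cons, pvMax?_cons, pvKOpt]
    by_cases h : (tl.foldl pvStep x).2 > 0 <;> simp [h]

lemma pvMem_keep (G1 G2 : List (String × Int)) (g : String) :
    g ∈ altKeep_step (altKeep_step ([] : PySem.Set String) G1) G2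
      ↔ pvKOpt G1 = some g ∨ pvKOpt G2 = some g := by
  simp only [pvAltKeep_step_eq]
  cases h1 : pvKOpt G1 <;> cases h2 : pvKOpt G2 <;>
    simp [PySem.Set.mem_add, eq_comm]

lemma pvStep_zero (m : String × Int) : pvStep ("", 0) m = if 0 < m.2 then m else ("", 0) := by
  simp [pvStep]

lemma pvTop_of_kOpt_none {G : List (String × Int)} (h : pvKOpt G = none) :
    G.foldl pvStep ("", 0) = ("", 0) := by
  cases G with
  | nil => rfl
  | cons x tl =>
    have hp : ¬ (0 : Int) < (tl.foldl pvStep x).2 := by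
      intro hc; simp [pvKOpt, hc] at h
    rw [List.foldl_cons]
    show List.foldl pvStep (pvStep ("", 0) x) tl = _
    rw [pvFoldl_step_out, pvStep_zero, if_neg hp]

lemma pvTop_of_kOpt_some {G : List (String × Int)} {g : String} (h : pvKOpt G = some g) :
    (G.foldl pvStep ("", 0)).1 = g ∧ ∃ s, (g, s) ∈ G := by
  cases G with
  | nil => cases h
  | cons x tl =>
    simp only [pvKOpt] at h
    by_cases hp : (tl.foldl pvStep x).2 > 0
    · rw [if_pos hp] at h
      cases h
      have hT : (x :: tl).foldl pvStep ("", 0) = tl.foldl pvStep x := by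
        rw [List.foldl_cons]
        show List.foldl pvStep (pvStep ("", 0) x) tl = _
        rw [pvFoldl_step_out, pvStep_zero, if_pos hp]
      refine ⟨by rw [hT], (tl.foldl pvStep x).2, ?_⟩
      simpa using pvFoldl_step_mem tl x
    · rw [if_neg hp] at h; cases h

lemma pvSw_ne_empty {g : String} (h : PySem.Str.startswith g "stx" = true) : g ≠ "" := by
  intro hg; rw [hg] at h; exact absurd h (by decide)

-- ===== VERDICT (by name: the statement is the Claim_ definition above) =====
theorem top_ranked_stx_bac_spec : Claim_equal_top_ranked_stx_bac := by
  intro gs _ hpre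
  obtain ⟨hnd, hp⟩ := hpre
  unfold Spec_top_ranked_stx_bac
  have hA : top_ranked_stx_bac gs =
      (delete_genes
        (gs.foldl (trsA_remove_step (gs.foldl (trsA_tophit_step (PySem.Dict.mk gs))
          (PySem.Dict.mk [("stx1", ("", 0)), ("stx2", ("", 0))]))) [])
        (PySem.Dict.mk gs)).items := rfl
  have hB : top_ranked_stx_bac_alt gs =
      (((gs.map (fun p => p.1)).filter
          (fun g => PySem.Str.startswith g "stx" &&
            !(((PySem.Dict.values (gs.foldl altGroup_step (PySem.Dict.mk [("stx1", []), ("stx2", [])]))).foldl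
                altKeep_step PySem.Set.empty).contains g))).foldl
        (fun d g => PySem.Dict.erase d g) (PySem.Dict.mk gs)).items := rfl
  rw [hA, hB]
  unfold delete_genes
  rw [pvTophits_fold gs hnd gs ("", 0) ("", 0) (fun p h => h) hp,
      pvGroups_fold gs [] [] hp]
  simp only [List.nil_append]
  set G1 := pvProj "stx1" gs with hG1
  set G2 := pvProj "stx2" gs with hG2
  have hvals : PySem.Dict.values (PySem.Dict.mk [("stx1", G1), ("stx2", G2)]) = [G1, G2] := by
    simp [PySem.Dict.values]
  rw [hvals]
  have hkeepfold : [G1, G2].foldl altKeep_step PySem.Set.empty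
      = altKeep_step (altKeep_step ([] : PySem.Set String) G1) G2 := rfl
  rw [hkeepfold]
  set keep := altKeep_step (altKeep_step ([] : PySem.Set String) G1) G2 with hkeep
  set th : PySem.Dict String (String × Int) :=
    PySem.Dict.mk [("stx1", G1.foldl pvStep ("", 0)), ("stx2", G2.foldl pvStep ("", 0))] with hth
  -- it suffices that the two remove lists coincide
  rw [pvRemoveA_fold th gs [], List.nil_append,
      pvRemoveB_eq_flatMap (fun g => PySem.Str.startswith g "stx" && !(keep.contains g)) gs]
  refine congrArg (fun L => (List.foldl (fun d g => PySem.Dict.erase d g) (PySem.Dict.mk gs) L).items)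
    (List.flatMap_congr ?_)
  intro p hpmem
  by_cases hsw : PySem.Str.startswith p.1 "stx"
  · obtain ⟨htype, _⟩ := hp p hpmem hsw
    -- membership in keep, characterised
    have hconkeep : keep.contains p.1 = decide (pvKOpt G1 = some p.1 ∨ pvKOpt G2 = some p.1) := by
      show List.contains keep p.1 = _
      rw [List.contains_eq_mem]
      exact decide_eq_decide.2 (pvMem_keep G1 G2 p.1)
    -- a kept gene of the other type can never be p.1
    have hother : ∀ t', PySem.Str.slice p.1 none (some 4) ≠ t' →
        pvKOpt (pvProj t' gs) ≠ some p.1 := by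
      intro t' hne hk
      obtain ⟨_, s, hmem2⟩ := pvTop_of_kOpt_some hk
      exact hne (pvProj_mem hmem2).2
    rcases htype with ht | ht
    · have hget : PySem.Dict.get? th "stx1" = some (G1.foldl pvStep ("", 0)) := by
        simp [hth, PySem.Dict.get?_mk_cons]
      have hL : trsA_remove_step th [] p
          = if p.1 ≠ (G1.foldl pvStep ("", 0)).1 then [p.1] else [] := by
        simp only [trsA_remove_step, hsw, if_true, ht, hget]
        split_ifs <;> rfl
      rw [hL]
      have hno2 : pvKOpt G2 ≠ some p.1 := by
        rw [hG2]; exact hother "stx2" (by rw [ht]; decide)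
      cases hk1 : pvKOpt G1 with
      | none =>
        have hT : G1.foldl pvStep ("", 0) = ("", 0) := pvTop_of_kOpt_none hk1
        have hne : p.1 ≠ ("", (0 : Int)).1 := pvSw_ne_empty hsw
        rw [hT, if_pos hne, hconkeep, hsw]
        simp [hk1, hno2]
      | some g =>
        have hT1 : (G1.foldl pvStep ("", 0)).1 = g := (pvTop_of_kOpt_some hk1).1
        rw [hconkeep, hsw, hT1]
        by_cases hpg : p.1 = g
        · rw [if_neg (by simpa using hpg)]
          simp [hk1, hpg]
        · rw [if_pos hpg]
          simp only [hk1, Option.some.injEq]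
          have : ¬ (g = p.1 ∨ pvKOpt G2 = some p.1) := by
            rintro (h | h)
            · exact hpg h.symm
            · exact hno2 h
          simp [this]
    · have hget : PySem.Dict.get? th "stx2" = some (G2.foldl pvStep ("", 0)) := by
        simp [hth, PySem.Dict.get?_mk_cons]
      have hL : trsA_remove_step th [] p
          = if p.1 ≠ (G2.foldl pvStep ("", 0)).1 then [p.1] else [] := by
        simp only [trsA_remove_step, hsw, if_true, ht, hget]
        split_ifs <;> rfl
      rw [hL]
      have hno1 : pvKOpt G1 ≠ some p.1 := by
        rw [hG1]; exact hother "stx1" (by rw [ht]; decide)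
      cases hk2 : pvKOpt G2 with
      | none =>
        have hT : G2.foldl pvStep ("", 0) = ("", 0) := pvTop_of_kOpt_none hk2
        have hne : p.1 ≠ ("", (0 : Int)).1 := pvSw_ne_empty hsw
        rw [hT, if_pos hne, hconkeep, hsw]
        simp [hk2, hno1]
      | some g =>
        have hT2 : (G2.foldl pvStep ("", 0)).1 = g := (pvTop_of_kOpt_some hk2).1
        rw [hconkeep, hsw, hT2]
        by_cases hpg : p.1 = g
        · rw [if_neg (by simpa using hpg)]
          simp [hk2, hpg]
        · rw [if_pos hpg]
          simp only [hk2, Option.some.injEq]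
          have : ¬ (pvKOpt G1 = some p.1 ∨ g = p.1) := by
            rintro (h | h)
            · exact hno1 h
            · exact hpg h.symm
          simp [this]
  · have hsw' : PySem.Str.startswith p.1 "stx" = false := by simpa using hsw
    have hL : trsA_remove_step th [] p = [] := by
      simp only [trsA_remove_step]; rw [hsw']; simp
    rw [hL, hsw']
    simp
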